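-- pv_equiv track=rewrite | github.com/SavageCooPigeonX/keystroke-telemetry | src/file_overwriter_seq001_v001_d0422__autonomous_file_patcher_lc_feat_file_cortex.py | _apply_search_replace
-- ===== SOURCE A (Python) =====
-- def _apply_search_replace(original: str, blocks: list[tuple[str, str]]) -> tuple[str, list[str]]:
--     """Apply search-replace blocks to source text.
--     Returns (patched_source, list_of_errors).
--     """
--     result = original
--     errors: list[str] = []
--     for i, (search, replace) in enumerate(blocks):
--         if search in result:
--             result = result.replace(search, replace, 1)
--         else:
--             # try stripping trailing whitespace differences
--             stripped_search = '\n'.join(l.rstrip() for l in search.splitlines())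
--             stripped_result = '\n'.join(l.rstrip() for l in result.splitlines())
--             if stripped_search in stripped_result:
--                 # rebuild with stripped comparison — apply via line scan
--                 result_lines = result.splitlines(keepends=True)
--                 search_lines = search.splitlines()
--                 n = len(search_lines)
--                 applied = False
--                 for j in range(len(result_lines) - n + 1):
--                     window = [l.rstrip() for l in result_lines[j:j + n]]
--                     if window == search_lines:
--                         indent = result_lines[j][: len(result_lines[j]) - len(result_lines[j].lstrip())]
--                         result = (
--                             ''.join(result_lines[:j])
--                             + replace
--                             + ('\n' if not replace.endswith('\n') else '')
--                             + ''.join(result_lines[j + n:])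
--                         )
--                         applied = True
--                         break
--                 if not applied:
--                     errors.append(f'block {i + 1}: SEARCH text not found')
--             else:
--                 errors.append(f'block {i + 1}: SEARCH text not found (tried strip)')
--     return result, errors
-- ===== SOURCE B (Python) =====
-- def _first_match(sl, stripped):
--     # first index j with stripped[j:j+len(sl)] == sl, by shrinking-suffix scan
--     j, suf = 0, stripped
--     while len(sl) <= len(suf):
--         if suf[:len(sl)] == sl:
--             return j
--         j, suf = j + 1, suf[1:]
--     return None
--
--
-- def _apply_block(result, search, replace):
--     idx = result.find(search)
--     if idx != -1:
--         return result[:idx] + replace + result[idx + len(search):], None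
--     sl = search.splitlines()
--     if '\n'.join(l.rstrip() for l in sl) not in '\n'.join(l.rstrip() for l in result.splitlines()):
--         return result, 'SEARCH text not found (tried strip)'
--     lines = result.splitlines(keepends=True)
--     j = _first_match(sl, [l.rstrip() for l in lines])
--     if j is None:
--         return result, 'SEARCH text not found'
--     nl = '' if replace.endswith('\n') else '\n'
--     return ''.join(lines[:j]) + replace + nl + ''.join(lines[j + len(sl):]), None
--
--
-- def _apply_search_replace(original: str, blocks: list[tuple[str, str]]) -> tuple[str, list[str]]:
--     result, errors = original, []
--     for i, (search, replace) in enumerate(blocks):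
--         result, err = _apply_block(result, search, replace)
--         if err is not None:
--             errors.append(f'block {i + 1}: {err}')
--     return result, errors
-- ===== Notes on version B (the rewrite author's own statement) =====
-- stated objective: alternative
-- what changed: B factors the work into a per-block helper that replaces the first occurrence by find + slicing instead of str.replace(...,1), and its whitespace-tolerant fallback rstrips the kept-ends lines once and scans them with a shrinking-suffix prefix match instead of re-rstripping a freshly sliced window at every start index.
import Mathlib
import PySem

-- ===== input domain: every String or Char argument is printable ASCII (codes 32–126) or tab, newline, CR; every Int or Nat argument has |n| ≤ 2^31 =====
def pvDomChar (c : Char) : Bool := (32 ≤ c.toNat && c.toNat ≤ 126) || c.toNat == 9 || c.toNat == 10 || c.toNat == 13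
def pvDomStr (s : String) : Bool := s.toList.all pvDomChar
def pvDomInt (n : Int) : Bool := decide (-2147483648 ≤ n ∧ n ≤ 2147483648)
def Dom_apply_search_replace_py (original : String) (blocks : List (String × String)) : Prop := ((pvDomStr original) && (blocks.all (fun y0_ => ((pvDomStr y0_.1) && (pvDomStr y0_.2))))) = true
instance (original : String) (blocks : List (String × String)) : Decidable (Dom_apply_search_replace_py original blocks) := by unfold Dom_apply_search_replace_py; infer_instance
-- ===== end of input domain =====

-- B rewrites A as a per-block helper: branch 1 uses find + slicing instead of str.replace(..., 1),
-- and the fallback rstrips the kept-ends lines ONCE and scans them by a shrinking-suffix prefix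
-- match instead of re-rstripping a fresh window slice at every index (objective: alternative).

-- ===== shared built-in helpers (both Pythons call these CPython primitives) =====

-- CPython's line-break set (same breaks PySem.Chars.splitlines uses)
def pvIsBreak (c : Char) : Bool :=
  have n := c.toNat
  decide (n = 10) || decide (n = 13) || decide (n = 11) || decide (n = 12) || decide (n = 28) ||
    decide (n = 29) || decide (n = 30) || decide (n = 133) || decide (n = 8232) || decide (n = 8233)

-- str.splitlines(keepends=True), hand-ported (PySem only has the keepends=False form);
-- exact: splits on the CPython break set above, '\r\n' kept as one terminator.
def pvSplitKeepGo : List Char → List Char → List (List Char) → List (List Char)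
  | [], cur, acc => if cur.isEmpty then acc.reverse else (cur.reverse :: acc).reverse
  | '\x0d' :: '\n' :: rest, cur, acc => pvSplitKeepGo rest [] (('\n' :: '\x0d' :: cur).reverse :: acc)
  | c :: rest, cur, acc =>
      if pvIsBreak c then pvSplitKeepGo rest [] ((c :: cur).reverse :: acc)
      else pvSplitKeepGo rest (c :: cur) acc

def pvSplitlinesKeep (s : List Char) : List (List Char) := pvSplitKeepGo s [] []

-- '\n'.join(l.rstrip() for l in s.splitlines())  (the same expression occurs in both Pythons)
def pvStripJoin (s : List Char) : List Char :=
  PySem.Chars.join ['\n'] ((PySem.Chars.splitlines s).map PySem.Chars.rstrip)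

-- ===== PORT A =====

-- s.replace(old, new, 1), hand-ported (PySem.Chars.replace has no count argument);
-- exact: replaces the leftmost occurrence only, old = '' inserts new at the front.
def pvReplaceOnce (old new : List Char) : List Char → List Char
  | [] => if old.isPrefixOf [] then new ++ List.drop old.length [] else []
  | c :: t =>
    if old.isPrefixOf (c :: t) then new ++ (c :: t).drop old.length
    else c :: pvReplaceOnce old new t

-- A's inner `for j in range(len(result_lines) - n + 1)` scan; the window slice
-- result_lines[j:j+n] (0 ≤ j) is (lines.drop j).take n, exact for these bounds.
def pvScanA (lines sl : List (List Char)) (n j : Nat) : Option Nat :=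
  if _h : j < lines.length + 1 - n then
    if ((lines.drop j).take n).map PySem.Chars.rstrip = sl then some j
    else pvScanA lines sl n (j + 1)
  else none
  termination_by lines.length + 1 - n - j

-- A's main `for i, (search, replace) in enumerate(blocks)` loop over state (result, errors)
def pvLoopA : List Char → List (List Char) → Nat → List (String × String) → List Char × List (List Char)
  | r, errs, _, [] => (r, errs)
  | r, errs, i, (se, rep) :: rest =>
    let sc := se.toList
    let rc := rep.toList
    if PySem.Chars.isIn sc r then
      pvLoopA (pvReplaceOnce sc rc r) errs (i + 1) rest
    else
      if PySem.Chars.isIn (pvStripJoin sc) (pvStripJoin r) then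
        let lines := pvSplitlinesKeep r
        let sl := PySem.Chars.splitlines sc
        match pvScanA lines sl sl.length 0 with
        | some j =>
            pvLoopA (PySem.Chars.join [] (lines.take j) ++ rc ++
                      (if PySem.Chars.endswith rc ['\n'] then [] else ['\n']) ++
                      PySem.Chars.join [] (lines.drop (j + sl.length))) errs (i + 1) rest
        | none =>
            pvLoopA r (errs ++ ["block ".toList ++ (PySem.Int.toStr ((i : Int) + 1)).toList ++
                                ": SEARCH text not found".toList]) (i + 1) rest
      else
        pvLoopA r (errs ++ ["block ".toList ++ (PySem.Int.toStr ((i : Int) + 1)).toList ++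
                            ": SEARCH text not found (tried strip)".toList]) (i + 1) rest

def apply_search_replace_py (original : String) (blocks : List (String × String)) : String × List String :=
  let out := pvLoopA original.toList [] 0 blocks
  (String.ofList out.1, out.2.map String.ofList)

-- ===== PORT B =====

-- B's _first_match: first j with stripped[j:j+len(sl)] == sl, shrinking-suffix scan
def pvFirstMatch (sl : List (List Char)) : List (List Char) → Option Nat
  | [] => if sl = [] then some 0 else none
  | x :: t =>
    if sl.length ≤ (x :: t).length then
      if sl.isPrefixOf (x :: t) then some 0 else (pvFirstMatch sl t).map (· + 1)
    else none

-- B's _apply_block; result[:idx] / result[idx+len:] with 0 ≤ idx are take/drop, exact here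
def pvBlockStep (r sc rc : List Char) : List Char × Option (List Char) :=
  let idx := PySem.Chars.find r sc
  if idx ≠ -1 then
    (r.take idx.toNat ++ rc ++ r.drop (idx.toNat + sc.length), none)
  else
    let sl := PySem.Chars.splitlines sc
    if !PySem.Chars.isIn (pvStripJoin sc) (pvStripJoin r) then
      (r, some ("SEARCH text not found (tried strip)".toList))
    else
      let lines := pvSplitlinesKeep r
      match pvFirstMatch sl (lines.map PySem.Chars.rstrip) with
      | none => (r, some ("SEARCH text not found".toList))
      | some j =>
          ((lines.take j).flatten ++ rc ++
            (if PySem.Chars.endswith rc ['\n'] then [] else ['\n']) ++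
            (lines.drop (j + sl.length)).flatten, none)

-- B's enumerate loop, appending 'block {i+1}: {err}' on errors
def pvLoopB : List Char → List (List Char) → Nat → List (String × String) → List Char × List (List Char)
  | r, errs, _, [] => (r, errs)
  | r, errs, i, (se, rep) :: rest =>
    match pvBlockStep r se.toList rep.toList with
    | (r', none) => pvLoopB r' errs (i + 1) rest
    | (r', some e) =>
        pvLoopB r' (errs ++ ["block ".toList ++ (PySem.Int.toStr ((i : Int) + 1)).toList ++
                             ": ".toList ++ e]) (i + 1) rest

def apply_search_replace_py_alt (original : String) (blocks : List (String × String)) : String × List String :=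
  let out := pvLoopB original.toList [] 0 blocks
  (String.ofList out.1, out.2.map String.ofList)

-- ===== PRECONDITION & SPEC =====
def Spec_apply_search_replace_py (original : String) (blocks : List (String × String)) (out : String × List String) : Prop := out = apply_search_replace_py_alt original blocks
instance (original : String) (blocks : List (String × String)) (out : String × List String) : Decidable (Spec_apply_search_replace_py original blocks out) := by unfold Spec_apply_search_replace_py; infer_instance

-- ===== CLAIM (what is proved, stated in full; the proofs are below) =====
def Claim_equal_apply_search_replace_py : Prop := ∀ (original : String) (blocks : List (String × String)), Dom_apply_search_replace_py original blocks → Spec_apply_search_replace_py original blocks (apply_search_replace_py original blocks)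

-- ===== LEMMAS AND PROOFS =====

-- replaceOnce splices `new` in at the leftmost match position
lemma pvReplaceOnce_eq_splice (sc rc : List Char) :
    ∀ (k : Nat) (r : List Char), sc <+: r.drop k → (∀ i < k, ¬ sc <+: r.drop i) →
      pvReplaceOnce sc rc r = r.take k ++ rc ++ r.drop (k + sc.length) := by
  intro k
  induction k with
  | zero =>
    intro r h _
    simp only [List.drop_zero] at h
    cases r with
    | nil =>
      have : sc = [] := List.prefix_nil.mp h
      simp [pvReplaceOnce, this]
    | cons c t =>
      rw [pvReplaceOnce, if_pos (List.isPrefixOf_iff_prefix.mpr h)]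
      simp
  | succ k ih =>
    intro r h hmin
    have h0 : ¬ sc <+: r := by simpa using hmin 0 (Nat.succ_pos k)
    cases r with
    | nil => simp at h; exact absurd (h ▸ List.nil_prefix) h0
    | cons c t =>
      rw [pvReplaceOnce, if_neg (by simpa using fun hp => h0 (List.isPrefixOf_iff_prefix.mp hp))]
      have ht := ih t (by simpa using h) (fun i hi => by simpa using hmin (i+1) (by omega))
      rw [ht]
      simp only [List.take_succ_cons, List.cons_append]
      have hk : k + 1 + sc.length = (k + sc.length) + 1 := by omega
      rw [hk, List.drop_succ_cons]

-- A evaluates its window at j = lines.length only when sl = [] (then it matches immediately)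
lemma pvScanA_boundary (sl lines : List (List Char)) :
    pvScanA lines sl sl.length lines.length
      = (pvFirstMatch sl ((lines.map PySem.Chars.rstrip).drop lines.length)).map (· + lines.length) := by
  rw [pvScanA]
  have hd : (lines.map PySem.Chars.rstrip).drop lines.length = [] := by
    apply List.drop_eq_nil_of_le; simp
  rw [hd]
  by_cases hn : sl = []
  · subst hn
    simp [pvFirstMatch]
  · have hlen : 0 < sl.length := List.length_pos_of_ne_nil hn
    rw [dif_neg (by omega)]
    simp [pvFirstMatch, hn]

lemma pvScanA_aux (sl : List (List Char)) :
    ∀ (fuel : Nat) (lines : List (List Char)) (j : Nat),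
      j ≤ lines.length → lines.length - j ≤ fuel →
      pvScanA lines sl sl.length j
        = (pvFirstMatch sl ((lines.map PySem.Chars.rstrip).drop j)).map (· + j) := by
  intro fuel
  induction fuel with
  | zero =>
    intro lines j hj hf
    have : j = lines.length := by omega
    subst this
    exact pvScanA_boundary sl lines
  | succ fuel ih =>
    intro lines j hj hf
    by_cases hjL : j = lines.length
    · subst hjL; exact pvScanA_boundary sl lines
    · have hjlt : j < lines.length := by omega
      have hlen : ((lines.map PySem.Chars.rstrip).drop j).length = lines.length - j := by simp
      obtain ⟨x, t, hsuf⟩ : ∃ x t, (lines.map PySem.Chars.rstrip).drop j = x :: t := by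
        cases hs : (lines.map PySem.Chars.rstrip).drop j with
        | nil => rw [hs] at hlen; simp at hlen; omega
        | cons x t => exact ⟨x, t, rfl⟩
      have hlt : t.length = lines.length - j - 1 := by
        rw [hsuf] at hlen; simp at hlen; omega
      have hwin : ((lines.drop j).take sl.length).map PySem.Chars.rstrip
          = (x :: t).take sl.length := by
        rw [← hsuf, ← List.map_drop, List.map_take]
      rw [pvScanA, hsuf]
      by_cases hg : sl.length ≤ (x :: t).length
      · have hdlt : j < lines.length + 1 - sl.length := by
          simp at hg; omega
        rw [dif_pos hdlt, pvFirstMatch, if_pos hg]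
        by_cases hp : sl.isPrefixOf (x :: t)
        · have : (x :: t).take sl.length = sl :=
            (List.prefix_iff_eq_take.mp (List.isPrefixOf_iff_prefix.mp hp)).symm
          rw [if_pos hp, if_pos (by rw [hwin, this]), Option.map_some]
          simp
        · have hne : ¬ ((lines.drop j).take sl.length).map PySem.Chars.rstrip = sl := by
            rw [hwin]
            intro hc
            exact hp (List.isPrefixOf_iff_prefix.mpr (List.prefix_iff_eq_take.mpr hc.symm))
          rw [if_neg hne, if_neg hp]
          have ht : (lines.map PySem.Chars.rstrip).drop (j+1) = t := by
            rw [List.drop_add_one_eq_tail_drop, hsuf]; rfl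
          rw [ih lines (j+1) (by omega) (by omega), ht]
          cases pvFirstMatch sl t with
          | none => simp
          | some a => simp; omega
      · have hng : ¬ j < lines.length + 1 - sl.length := by
          simp at hg; omega
        rw [dif_neg hng, pvFirstMatch, if_neg hg]
        simp

-- A's index scan = B's shrinking-suffix scan over the once-rstripped lines
lemma pvScanA_eq_firstMatch (lines sl : List (List Char)) :
    pvScanA lines sl sl.length 0 = pvFirstMatch sl (lines.map PySem.Chars.rstrip) := by
  rw [pvScanA_aux sl lines.length lines 0 (by omega) (by omega)]
  simp only [List.drop_zero]
  cases pvFirstMatch sl (lines.map PySem.Chars.rstrip) <;> simp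

lemma pvJoin_nil_eq_flatten (xs : List (List Char)) : PySem.Chars.join [] xs = xs.flatten := by
  induction xs with
  | nil => simp [PySem.Chars.join, List.intercalate]
  | cons x t ih => cases t <;> simp_all [PySem.Chars.join, List.intercalate, List.intersperse]

-- the fixed message suffixes split at ": " the same way B assembles them
lemma pvMsg_found : ": SEARCH text not found".toList
    = ": ".toList ++ "SEARCH text not found".toList := by decide

lemma pvMsg_strip : ": SEARCH text not found (tried strip)".toList
    = ": ".toList ++ "SEARCH text not found (tried strip)".toList := by decide

lemma pvLoopA_eq_pvLoopB : ∀ (blocks : List (String × String)) (r : List Char)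
    (errs : List (List Char)) (i : Nat), pvLoopA r errs i blocks = pvLoopB r errs i blocks := by
  intro blocks
  induction blocks with
  | nil => intro r errs i; rfl
  | cons b rest ih =>
    intro r errs i
    obtain ⟨se, rep⟩ := b
    rw [pvLoopA, pvLoopB]
    by_cases h1 : PySem.Chars.isIn se.toList r = true
    · -- branch 1: exact substring hit; replace(…,1) = find + splice
      have hne : PySem.Chars.find r se.toList ≠ -1 := by
        simpa [PySem.Chars.isIn, bne_iff_ne] using h1
      have hpos : 0 ≤ PySem.Chars.find r se.toList := by
        have := PySem.Chars.neg_one_le_find r se.toList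
        omega
      obtain ⟨hpre, hmin⟩ := PySem.Chars.find_spec hpos
      rw [if_pos h1]
      unfold pvBlockStep
      rw [if_pos hne]
      rw [pvReplaceOnce_eq_splice se.toList rep.toList (PySem.Chars.find r se.toList).toNat r hpre hmin]
      exact ih _ _ _
    · have heq : PySem.Chars.find r se.toList = -1 := by
        by_contra hc
        exact h1 (by simpa [PySem.Chars.isIn, bne_iff_ne] using hc)
      have hnn : ¬ (PySem.Chars.find r se.toList ≠ -1) := by simp [heq]
      rw [if_neg h1]
      by_cases h2 : PySem.Chars.isIn (pvStripJoin se.toList) (pvStripJoin r) = true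
      · rw [if_pos h2]
        unfold pvBlockStep
        rw [if_neg hnn,
          if_neg (show ¬ ((!PySem.Chars.isIn (pvStripJoin se.toList) (pvStripJoin r)) = true) by
            simp [h2])]
        simp only [pvScanA_eq_firstMatch]
        cases hm : pvFirstMatch (PySem.Chars.splitlines se.toList)
            (List.map PySem.Chars.rstrip (pvSplitlinesKeep r)) with
        | none =>
          rw [pvMsg_found]
          simpa [List.append_assoc] using ih _ _ _
        | some j =>
          simpa [pvJoin_nil_eq_flatten, List.append_assoc] using ih _ _ _
      · rw [if_neg h2]
        unfold pvBlockStep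
        rw [if_neg hnn,
          if_pos (show (!PySem.Chars.isIn (pvStripJoin se.toList) (pvStripJoin r)) = true by
            simp [Bool.not_eq_true] at h2 ⊢; exact h2)]
        rw [pvMsg_strip]
        simpa [List.append_assoc] using ih _ _ _

-- ===== VERDICT (by name: the statement is the Claim_ definition above) =====
theorem apply_search_replace_py_spec : Claim_equal_apply_search_replace_py := by
  intro original blocks _
  unfold Spec_apply_search_replace_py apply_search_replace_py apply_search_replace_py_alt
  rw [pvLoopA_eq_pvLoopB]
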